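-- pv_equiv track=rewrite | github.com/FatimaaShahid/HackerRank | DataStructures/Starfleet.py | solve
-- ===== SOURCE A (Python) =====
-- from bisect import bisect_left, bisect_right
-- from collections import defaultdict
--
-- def solve(v, ships, queries):
--
--     fighters = defaultdict(list)
--
--     for x, y, f in ships:
--         fighters[f].append(y)
--
--     for f in fighters:
--         fighters[f].sort()
--
--     res = []
--
--     for yu, yd, _ in queries:
--         max_blocked = 0
--
--         for y_list in fighters.values():
--
--             start_index = bisect_left(y_list, yd)
--
--             end_index = bisect_right(y_list, yu)
--
--             ships_in_range = end_index - start_index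
--             max_blocked = max(max_blocked, ships_in_range)
--
--
--         res.append(max_blocked)
--
--     return res
-- ===== SOURCE B (Python) =====
-- def solve(v, ships, queries):
--     res = []
--     for yu, yd, _ in queries:
--         counts = {}
--         for _, y, f in ships:
--             if yd <= y <= yu:
--                 counts[f] = counts.get(f, 0) + 1
--         res.append(max(counts.values(), default=0))
--     return res
-- ===== Notes on version B (the rewrite author's own statement) =====
-- stated objective: faster
-- what changed: Replaced the per-fighter grouping dict, per-group sorting and bisect binary searches with a single linear scan per query that counts in-range ships per fighter in a frequency dict and takes the max count (0 if empty).
import Mathlib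
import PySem

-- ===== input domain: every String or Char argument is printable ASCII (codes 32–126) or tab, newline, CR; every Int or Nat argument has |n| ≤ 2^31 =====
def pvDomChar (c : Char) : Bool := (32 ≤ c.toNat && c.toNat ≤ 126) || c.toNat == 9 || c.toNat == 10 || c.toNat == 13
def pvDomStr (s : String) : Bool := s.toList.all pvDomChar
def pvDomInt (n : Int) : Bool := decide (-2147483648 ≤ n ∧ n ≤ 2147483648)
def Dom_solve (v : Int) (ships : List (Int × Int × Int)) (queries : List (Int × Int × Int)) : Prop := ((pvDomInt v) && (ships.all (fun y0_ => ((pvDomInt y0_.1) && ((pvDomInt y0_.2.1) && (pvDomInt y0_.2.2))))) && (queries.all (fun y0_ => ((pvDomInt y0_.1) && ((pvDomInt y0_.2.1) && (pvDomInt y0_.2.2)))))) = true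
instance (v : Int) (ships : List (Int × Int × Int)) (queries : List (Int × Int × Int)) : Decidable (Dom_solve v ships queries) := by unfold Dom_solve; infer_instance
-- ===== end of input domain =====

-- B replaces A's per-fighter grouping dict + per-group sort + bisect binary searches by a single
-- linear scan per query counting in-range ships per fighter in a dict, then taking the max count (0 if none).

-- ===== PORT A =====
-- fighters = defaultdict(list); fighters[f].append(y)  ≡  modify f (default []) (· ++ [y])
def solve (v : Int) (ships : List (Int × Int × Int)) (queries : List (Int × Int × Int)) : List Int :=
  let fighters : PySem.Dict Int (List Int) :=
    ships.foldl (fun d s => d.modify s.2.2 [] (fun l => l ++ [s.2.1])) PySem.Dict.empty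
  -- for f in fighters: fighters[f].sort()
  let fighters2 : PySem.Dict Int (List Int) :=
    fighters.keys.foldl (fun d f => d.modify f [] (fun l => PySem.List.sorted l (fun y => y))) fighters
  queries.foldl (fun res q =>
    let maxBlocked : Int :=
      fighters2.values.foldl (fun m yList =>
        let startIndex := PySem.List.bisectLeft yList q.2.1
        let endIndex := PySem.List.bisectRight yList q.1
        let shipsInRange : Int := (endIndex : Int) - (startIndex : Int)
        max m shipsInRange) 0
    res ++ [maxBlocked]) []

-- ===== PORT B =====
def solve_alt (v : Int) (ships : List (Int × Int × Int)) (queries : List (Int × Int × Int)) : List Int :=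
  queries.foldl (fun res q =>
    let counts : PySem.Dict Int Int :=
      ships.foldl (fun d s =>
        if q.2.1 ≤ s.2.1 ∧ s.2.1 ≤ q.1 then d.insert s.2.2 (d.getD s.2.2 0 + 1) else d)
        PySem.Dict.empty
    res ++ [PySem.List.maxD counts.values (fun y => y) 0]) []

-- ===== PRECONDITION & SPEC =====
def Spec_solve (v : Int) (ships : List (Int × Int × Int)) (queries : List (Int × Int × Int)) (out : List Int) : Prop := out = solve_alt v ships queries
instance (v : Int) (ships : List (Int × Int × Int)) (queries : List (Int × Int × Int)) (out : List Int) : Decidable (Spec_solve v ships queries out) := by unfold Spec_solve; infer_instance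

-- ===== CLAIM (what is proved, stated in full; the proofs are below) =====
def Claim_equal_solve : Prop := ∀ (v : Int) (ships : List (Int × Int × Int)) (queries : List (Int × Int × Int)), Dom_solve v ships queries → Spec_solve v ships queries (solve v ships queries)

-- ===== LEMMAS AND PROOFS =====

-- fighter ids of the in-range ships of a query (yu, yd, _)
def pvFl (yu yd : Int) (ships : List (Int × Int × Int)) : List Int :=
  (ships.filter (fun s => decide (yd ≤ s.2.1 ∧ s.2.1 ≤ yu))).map (fun s => s.2.2)

-- running max over ks of g, starting at 0
def pvF (g : Int → Int) (ks : List Int) : Int := ks.foldl (fun m f => max m (g f)) 0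

-- a predicate that is true exactly on indices below r has countP r
lemma pv_countP_boundary (p : Int → Bool) (xs : List Int) (r : Nat) (hr : r ≤ xs.length)
    (h : ∀ j (hj : j < xs.length), p xs[j] = true ↔ j < r) : xs.countP p = r := by
  induction xs generalizing r with
  | nil => simp at hr; simp [hr]
  | cons x t ih =>
    cases r with
    | zero =>
      rw [List.countP_eq_zero.mpr]
      intro a ha
      obtain ⟨j, hj, rfl⟩ := List.mem_iff_getElem.mp ha
      simpa using (h j hj)
    | succ r' =>
      have hx : p x = true := by simpa using (h 0 (by simp)).mpr (by omega)
      rw [List.countP_cons_of_pos hx]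
      have hih := ih r' (by simpa using hr) (fun j hj => by
        have := h (j+1) (by simpa using hj)
        simpa using this)
      omega

lemma pv_bisectLeft_eq (xs : List Int) (x : Int) (hs : List.Pairwise (· ≤ ·) xs) :
    PySem.List.bisectLeft xs x = xs.countP (fun y => decide (y < x)) := by
  obtain ⟨hle, hlt, hge⟩ := PySem.List.bisectLeft_spec xs x hs
  refine (pv_countP_boundary _ xs _ hle (fun j hj => ?_)).symm
  simp only [decide_eq_true_eq]
  constructor
  · intro hpx
    by_contra hc
    exact absurd (hge j hj (by omega)) (by omega)
  · exact hlt j hj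

lemma pv_bisectRight_eq (xs : List Int) (x : Int) (hs : List.Pairwise (· ≤ ·) xs) :
    PySem.List.bisectRight xs x = xs.countP (fun y => decide (y ≤ x)) := by
  obtain ⟨hle, hlt, hge⟩ := PySem.List.bisectRight_spec xs x hs
  refine (pv_countP_boundary _ xs _ hle (fun j hj => ?_)).symm
  simp only [decide_eq_true_eq]
  constructor
  · intro hpx
    by_contra hc
    exact absurd (hge j hj (by omega)) (by omega)
  · exact hlt j hj

lemma pv_countP_split (yu yd : Int) (l : List Int) (h : yd ≤ yu) :
    l.countP (fun y => decide (y ≤ yu))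
      = l.countP (fun y => decide (y < yd)) + l.countP (fun y => decide (yd ≤ y ∧ y ≤ yu)) := by
  induction l with
  | nil => simp
  | cons a t ih =>
    simp only [List.countP_cons]
    split_ifs with h1 h2 h3 h4 h5 h6 h7 <;>
      (simp only [decide_eq_true_eq] at *; omega)

lemma pv_countP_sub (yu yd : Int) (l : List Int) (h : yd ≤ yu) :
    (l.countP (fun y => decide (y ≤ yu)) : Int) - l.countP (fun y => decide (y < yd))
      = l.countP (fun y => decide (yd ≤ y ∧ y ≤ yu)) := by
  rw [pv_countP_split yu yd l h]; push_cast; ring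

-- one step of A's inner loop agrees with the in-range count once floored by a nonnegative acc
lemma pv_max_step (yu yd : Int) (l : List Int) (hs : List.Pairwise (· ≤ ·) l) (m : Int) (hm : 0 ≤ m) :
    max m ((PySem.List.bisectRight l yu : Int) - (PySem.List.bisectLeft l yd : Int))
      = max m ((l.countP (fun y => decide (yd ≤ y ∧ y ≤ yu)) : Int)) := by
  rw [pv_bisectRight_eq l yu hs, pv_bisectLeft_eq l yd hs]
  by_cases h : yd ≤ yu
  · rw [pv_countP_sub yu yd l h]
  · have h0 : l.countP (fun y => decide (yd ≤ y ∧ y ≤ yu)) = 0 :=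
      List.countP_eq_zero.mpr (fun a _ => by simp; omega)
    have hle : l.countP (fun y => decide (y ≤ yu)) ≤ l.countP (fun y => decide (y < yd)) :=
      List.countP_mono_left (fun a _ ha => by simp at ha ⊢; omega)
    rw [h0]
    rw [max_eq_left (by omega), max_eq_left (by simpa using hm)]

-- folding modify over distinct keys applies g once at each key
lemma pv_getD_foldl_modify_distinct {κ ν : Type} [BEq κ] [LawfulBEq κ] [DecidableEq κ]
    (ks : List κ) (hnd : ks.Nodup) (d0 : ν) (g : ν → ν) (d : PySem.Dict κ ν) (c : κ) :
    (ks.foldl (fun d f => d.modify f d0 g) d).getD c d0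
      = if c ∈ ks then g (d.getD c d0) else d.getD c d0 := by
  induction ks generalizing d with
  | nil => simp
  | cons f rest ih =>
    simp only [List.foldl_cons]
    rw [ih (by simp at hnd; exact hnd.2) (d.modify f d0 g)]
    have hfr : f ∉ rest := (List.nodup_cons.mp hnd).1
    by_cases hc : c ∈ rest
    · have hne : c ≠ f := fun h => hfr (h ▸ hc)
      rw [if_pos hc, if_pos (by simp [hc])]
      rw [PySem.Dict.getD_modify, if_neg hne]
    · by_cases hcf : c = f
      · subst hcf
        rw [if_neg hc, if_pos (by simp)]
        rw [PySem.Dict.getD_modify, if_pos rfl]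
      · rw [if_neg hc, if_neg (by simp [hc, hcf])]
        rw [PySem.Dict.getD_modify, if_neg hcf]

lemma pv_set_update_self {κ : Type} [BEq κ] [LawfulBEq κ] (s : List κ) (hnd : s.Nodup) :
    PySem.Set.update s s = s := by
  rw [PySem.Set.update_eq_append_filter, PySem.Set.ofList_eq_self_of_nodup s hnd]
  rw [List.filter_eq_nil_iff.mpr (fun y hy => by simp [PySem.Set.contains_eq_listContains, hy])]
  simp

lemma pv_foldl_max_le (g : Int → Int) (ks : List Int) (a M : Int) (ha : a ≤ M)
    (h : ∀ f ∈ ks, g f ≤ M) : ks.foldl (fun m f => max m (g f)) a ≤ M := by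
  induction ks generalizing a with
  | nil => simpa
  | cons k t ih =>
    simp only [List.foldl_cons]
    exact ih _ (max_le ha (h k (by simp))) (fun f hf => h f (by simp [hf]))

lemma pv_foldl_max_congr (A B : Int → Int) (ks : List Int)
    (h : ∀ f ∈ ks, ∀ m : Int, 0 ≤ m → max m (A f) = max m (B f))
    (m0 : Int) (h0 : 0 ≤ m0) :
    ks.foldl (fun m f => max m (A f)) m0 = ks.foldl (fun m f => max m (B f)) m0 := by
  induction ks generalizing m0 with
  | nil => rfl
  | cons k t ih =>
    simp only [List.foldl_cons]
    rw [h k (by simp) m0 h0]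
    exact ih (fun f hf => h f (by simp [hf])) _ (le_trans h0 (le_max_left _ _))

-- the max over all fighters equals the max over fighters with an in-range ship
lemma pv_F_bridge (g : Int → Int) (K K' : List Int)
    (hsub : ∀ f ∈ K', f ∈ K) (hz : ∀ f ∈ K, f ∉ K' → g f = 0) :
    pvF g K = pvF g K' := by
  unfold pvF
  apply le_antisymm
  · apply pv_foldl_max_le _ _ _ _ ((PySem.List.le_foldl_max_int K' g 0).1)
    intro f hf
    by_cases hf' : f ∈ K'
    · exact (PySem.List.le_foldl_max_int K' g 0).2 f hf'
    · rw [hz f hf hf']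
      exact (PySem.List.le_foldl_max_int K' g 0).1
  · apply pv_foldl_max_le _ _ _ _ ((PySem.List.le_foldl_max_int K g 0).1)
    intro f hf
    exact (PySem.List.le_foldl_max_int K g 0).2 f (hsub f hf)

lemma pv_count_fl (yu yd : Int) (ships : List (Int × Int × Int)) (f : Int) :
    (pvFl yu yd ships).count f
      = ships.countP (fun s => (s.2.2 == f) && decide (yd ≤ s.2.1 ∧ s.2.1 ≤ yu)) := by
  unfold pvFl
  rw [List.count_eq_countP, List.countP_map, List.countP_filter]
  rfl

lemma pv_countP_ys (yu yd : Int) (ships : List (Int × Int × Int)) (f : Int) :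
    ((ships.filter (fun s => s.2.2 == f)).map (fun s => s.2.1)).countP
        (fun y => decide (yd ≤ y ∧ y ≤ yu))
      = (pvFl yu yd ships).count f := by
  rw [List.countP_map, List.countP_filter, pv_count_fl]
  exact List.countP_congr (fun s _ => by simp [Bool.and_comm])

-- A's per-query value
lemma pv_Aq_eq (yu yd : Int) (ships : List (Int × Int × Int)) :
    ((((ships.foldl (fun d s => d.modify s.2.2 [] (fun l => l ++ [s.2.1])) PySem.Dict.empty).keys.foldl
        (fun d f => d.modify f [] (fun l => PySem.List.sorted l (fun y => y)))
        (ships.foldl (fun d s => d.modify s.2.2 [] (fun l => l ++ [s.2.1])) PySem.Dict.empty)).values).foldl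
      (fun m yList => max m ((PySem.List.bisectRight yList yu : Int) - (PySem.List.bisectLeft yList yd : Int))) 0)
    = pvF (fun f => ((pvFl yu yd ships).count f : Int)) (PySem.Set.ofList (ships.map (fun s => s.2.2))) := by
  set d1 := ships.foldl (fun d s => d.modify s.2.2 [] (fun l => l ++ [s.2.1])) PySem.Dict.empty with hd1
  have hkeys1 : d1.keys = PySem.Set.ofList (ships.map (fun s => s.2.2)) := by
    rw [hd1, PySem.Dict.keys_foldl_modify_key ships (fun s => s.2.2) [] (fun _ s => fun l => l ++ [s.2.1])]
    rw [PySem.Dict.keys_empty, PySem.Set.update_nil_left]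
  have hnd1 : d1.keys.Nodup := by rw [hkeys1]; exact PySem.Set.nodup_ofList _
  have hgetD1 : ∀ c, d1.getD c [] = (ships.filter (fun s => s.2.2 == c)).map (fun s => s.2.1) := by
    intro c
    have he : d1 = (ships.map (fun s => (s.2.2, s.2.1))).foldl
        (fun d p => d.modify p.1 [] (fun l => l ++ [p.2])) PySem.Dict.empty := by
      rw [hd1, List.foldl_map]
    rw [he, PySem.Dict.getD_foldl_modify_append]
    simp [List.filter_map, List.map_map, Function.comp_def]
  set d2 := d1.keys.foldl (fun d f => d.modify f [] (fun l => PySem.List.sorted l (fun y => y))) d1 with hd2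
  have hkeys2 : d2.keys = d1.keys := by
    rw [hd2, PySem.Dict.keys_foldl_modify, pv_set_update_self _ hnd1]
  have hnd2 : d2.keys.Nodup := by rw [hkeys2]; exact hnd1
  have hgetD2 : ∀ c ∈ d1.keys, d2.getD c []
      = PySem.List.sorted ((ships.filter (fun s => s.2.2 == c)).map (fun s => s.2.1)) (fun y => y) := by
    intro c hc
    rw [hd2, pv_getD_foldl_modify_distinct _ hnd1, if_pos hc, hgetD1]
  rw [PySem.Dict.values_eq_map_keys d2 hnd2 [], hkeys2, List.foldl_map]
  have hcong :
      List.foldl (fun m k => max m ((PySem.List.bisectRight (d2.getD k []) yu : Int)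
          - (PySem.List.bisectLeft (d2.getD k []) yd : Int))) 0 d1.keys
    = List.foldl (fun m k => max m
        ((PySem.List.bisectRight (PySem.List.sorted ((ships.filter (fun s => s.2.2 == k)).map (fun s => s.2.1)) (fun y => y)) yu : Int)
          - (PySem.List.bisectLeft (PySem.List.sorted ((ships.filter (fun s => s.2.2 == k)).map (fun s => s.2.1)) (fun y => y)) yd : Int))) 0 d1.keys :=
    PySem.List.foldl_congr_mem _ _ _ _ (fun acc k hk => by rw [hgetD2 k hk])
  rw [hcong]
  unfold pvF
  rw [← hkeys1]
  apply pv_foldl_max_congr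
  · intro f _ m hm
    rw [pv_max_step yu yd _ (by simpa using PySem.List.sorted_pairwise _ (fun y => y)) m hm]
    rw [(PySem.List.sorted_perm _ (fun y => y) false).countP_eq, pv_countP_ys]
  · exact le_refl 0

-- B's per-query value
lemma pv_Bq_eq (yu yd : Int) (ships : List (Int × Int × Int)) :
    PySem.List.maxD ((ships.foldl (fun d s =>
        if yd ≤ s.2.1 ∧ s.2.1 ≤ yu then d.insert s.2.2 (d.getD s.2.2 0 + 1) else d)
        PySem.Dict.empty).values) (fun y => y) 0
    = pvF (fun f => ((pvFl yu yd ships).count f : Int)) (PySem.Set.ofList (pvFl yu yd ships)) := by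
  rw [PySem.List.foldl_ite_eq_foldl_filter]
  rw [show (List.foldl (fun (d : PySem.Dict Int Int) (s : Int × Int × Int) => d.insert s.2.2 (d.getD s.2.2 0 + 1)) PySem.Dict.empty
        (ships.filter (fun s => decide (yd ≤ s.2.1 ∧ s.2.1 ≤ yu))))
      = (pvFl yu yd ships).foldl (fun d k => d.insert k (d.getD k 0 + 1)) PySem.Dict.empty from by
    unfold pvFl; rw [List.foldl_map]]
  set fl := pvFl yu yd ships with hfl
  set cnts := fl.foldl (fun (d : PySem.Dict Int Int) (k : Int) => d.insert k (d.getD k 0 + 1)) PySem.Dict.empty with hcnts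
  have hkeys : cnts.keys = PySem.Set.ofList fl := by
    rw [hcnts, PySem.Dict.keys_foldl_insert fl (fun d k => d.getD k 0 + 1) PySem.Dict.empty]
    rw [PySem.Dict.keys_empty, PySem.Set.update_nil_left]
  have hnd : cnts.keys.Nodup := by rw [hkeys]; exact PySem.Set.nodup_ofList _
  have hgetD : ∀ c, cnts.getD c 0 = (fl.count c : Int) := by
    intro c
    rw [hcnts, PySem.Dict.getD_foldl_insert_add_one]
    simp
  rw [PySem.Dict.values_eq_map_keys cnts hnd 0, hkeys]
  have hmap : (PySem.Set.ofList fl).map (fun k => cnts.getD k 0)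
      = (PySem.Set.ofList fl).map (fun k => (fl.count k : Int)) :=
    List.map_congr_left (fun k _ => hgetD k)
  rw [hmap]
  cases hK : PySem.Set.ofList fl with
  | nil => simp [PySem.List.maxD, PySem.List.max?, pvF]
  | cons k t =>
    unfold PySem.List.maxD
    rw [List.map_cons, PySem.List.max?_id_cons]
    rw [Option.getD_some, List.foldl_map]
    unfold pvF
    rw [List.foldl_cons]
    beta_reduce
    rw [max_eq_right (by positivity : (0:Int) ≤ (List.count k fl : Int))]

lemma pv_q_eq (yu yd : Int) (ships : List (Int × Int × Int)) :
    pvF (fun f => ((pvFl yu yd ships).count f : Int)) (PySem.Set.ofList (ships.map (fun s => s.2.2)))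
    = pvF (fun f => ((pvFl yu yd ships).count f : Int)) (PySem.Set.ofList (pvFl yu yd ships)) := by
  apply pv_F_bridge
  · intro f hf
    rw [PySem.Set.mem_ofList] at hf ⊢
    unfold pvFl at hf
    simp only [List.mem_map, List.mem_filter] at hf ⊢
    obtain ⟨s, ⟨hs, _⟩, rfl⟩ := hf
    exact ⟨s, hs, rfl⟩
  · intro f _ hf
    rw [PySem.Set.mem_ofList] at hf
    simp [List.count_eq_zero.mpr hf]

-- ===== VERDICT (by name: the statement is the Claim_ definition above) =====
theorem solve_spec : Claim_equal_solve := by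
  intro v ships queries _
  unfold Spec_solve solve solve_alt
  rw [PySem.List.foldl_append_singleton_eq_map, PySem.List.foldl_append_singleton_eq_map]
  simp only [List.nil_append]
  refine List.map_congr_left (fun q _ => ?_)
  rw [pv_Aq_eq q.1 q.2.1 ships, pv_Bq_eq q.1 q.2.1 ships, pv_q_eq]
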